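-- pv_equiv track=rewrite | github.com/jasonthehung/freeCodeCamp-daily-coding-challenge | 1.Vowel-Balance/main.py | solution_1_iterative
-- ===== SOURCE A (Python) =====
-- def solution_1_iterative(s):
--     """
--     Method 1: Iterative (Two Pointers)
--     -------------------------------------------------
--     Best for: Efficiency (Single Pass).
--     Pros: O(N) time complexity.
--     """
--     # Define vowels locally for self-containment
--     vowels = set("aeiouAEIOU")
--
--     n = len(s)
--     half = n // 2
--     balance = 0
--
--     for i in range(half):
--         # Check character in the first half
--         if s[i] in vowels:
--             balance += 1
--
--         # Check corresponding character in the second half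
--         # (n - 1 - i) gets the mirror index from the end
--         if s[n - 1 - i] in vowels:
--             balance -= 1
--
--     return balance == 0
-- ===== SOURCE B (Python) =====
-- def solution_1_iterative(s):
--     # Per-letter counting: for each of the 10 vowel letters, use str.count on the
--     # two half slices and accumulate the difference; no per-index walk at all.
--     half = len(s) // 2
--     first = s[:half]
--     second = s[len(s) - half:]
--     diff = 0
--     for v in "aeiouAEIOU":
--         diff += first.count(v) - second.count(v)
--     return diff == 0
-- ===== Notes on version B (the rewrite author's own statement) =====
-- stated objective: faster
-- what changed: Replaces A's single mirror-index walk (one signed balance over range(n//2) reading s[i] and s[n-1-i] with a per-character set-membership test) with per-letter counting: for each of the 10 vowel letters, str.count on the first-half and last-half slices, accumulating the difference of the two counts; no character-by-character Python loop or membership test remains.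
import Mathlib
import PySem

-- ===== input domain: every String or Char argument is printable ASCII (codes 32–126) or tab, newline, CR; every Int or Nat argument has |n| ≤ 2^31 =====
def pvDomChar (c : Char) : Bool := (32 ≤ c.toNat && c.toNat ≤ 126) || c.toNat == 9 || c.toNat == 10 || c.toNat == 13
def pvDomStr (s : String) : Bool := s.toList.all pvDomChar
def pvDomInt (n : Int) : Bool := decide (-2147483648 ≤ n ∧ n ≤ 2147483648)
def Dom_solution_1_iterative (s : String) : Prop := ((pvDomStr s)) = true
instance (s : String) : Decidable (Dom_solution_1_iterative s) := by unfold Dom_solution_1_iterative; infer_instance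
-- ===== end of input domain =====

-- B replaces A's per-index mirror-balance walk with per-letter counting: str.count of each
-- of the 10 vowel letters on the two half slices, accumulating the count difference.

-- ===== PORT A =====
-- A's single loop over range(n//2) keeping a signed balance, reading s[i] and s[n-1-i].
-- pyGetD with a dummy default is exact here: 0 ≤ i < n//2 and 0 ≤ n-1-i < n, so Python never raises.
def solution_1_iterative (s : String) : Bool :=
  let vowels : PySem.Set Char := PySem.Set.ofList "aeiouAEIOU".toList
  let l := s.toList
  let n : Int := PySem.List.len l
  let half : Int := PySem.Int.floordiv n 2
  let balance : Int := (PySem.List.pyRange 0 half 1).foldl (fun b i =>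
    let b := if PySem.Set.contains vowels (PySem.List.pyGetD l i ' ') then b + 1 else b
    if PySem.Set.contains vowels (PySem.List.pyGetD l (n - 1 - i) ' ') then b - 1 else b) 0
  balance == 0

-- ===== PORT B =====
-- B: two half slices; for each vowel letter v, str.count(v) on each slice (PySem.Chars.count
-- with the one-character substring [v] is exactly str.count), accumulating the difference.
def solution_1_iterative_alt (s : String) : Bool :=
  let l := s.toList
  let n : Int := PySem.List.len l
  let half : Int := PySem.Int.floordiv n 2
  let first := PySem.List.slice l none (some half)
  let second := PySem.List.slice l (some (n - half)) none
  let diff : Int := "aeiouAEIOU".toList.foldl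
    (fun d v => d + ((PySem.Chars.count first [v] : Int) - (PySem.Chars.count second [v] : Int))) 0
  diff == 0

-- ===== PRECONDITION & SPEC =====
def Spec_solution_1_iterative (s : String) (out : Bool) : Prop := out = solution_1_iterative_alt s
instance (s : String) (out : Bool) : Decidable (Spec_solution_1_iterative s out) := by unfold Spec_solution_1_iterative; infer_instance

-- ===== CLAIM (what is proved, stated in full; the proofs are below) =====
def Claim_equal_solution_1_iterative : Prop := ∀ (s : String), Dom_solution_1_iterative s → Spec_solution_1_iterative s (solution_1_iterative s)

-- ===== LEMMAS AND PROOFS =====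

-- str.count with a one-character needle is the character count (fuel-indexed go).
theorem pvCountGoSingleton (c : Char) (l : List Char) (fuel acc : Nat) (h : l.length ≤ fuel) :
    PySem.Chars.count.go [c] fuel l acc = acc + l.count c := by
  induction l generalizing fuel acc with
  | nil => cases fuel <;> simp [PySem.Chars.count.go]
  | cons x t ih =>
    cases fuel with
    | zero => simp at h
    | succ fuel =>
      have ht : t.length ≤ fuel := by simpa using h
      by_cases hx : c = x
      · subst hx
        have hrec := ih fuel (acc + 1) ht
        simp only [PySem.Chars.count.go, List.isPrefixOf, beq_self_eq_true, Bool.and_true,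
          if_pos, List.length_singleton, List.drop_succ_cons, List.drop_zero,
          List.count_cons_self]
        simp [hrec]
        omega
      · have hbx : (x == c) = false := by simp [Ne.symm hx]
        simp only [PySem.Chars.count.go, List.isPrefixOf, Bool.and_true]
        rw [if_neg (by simp [hx]), ih fuel acc ht, List.count_cons, hbx]
        simp

theorem pvCountSingleton (c : Char) (l : List Char) :
    PySem.Chars.count l [c] = l.count c := by
  simpa using pvCountGoSingleton c l l.length 0 le_rfl

-- countP of a disjoint disjunction adds.
theorem pvCountPOr {α : Type} (p q : α → Bool) (L : List α)
    (hd : ∀ x, ¬(p x = true ∧ q x = true)) :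
    L.countP (fun x => p x || q x) = L.countP p + L.countP q := by
  induction L with
  | nil => simp
  | cons x L ih =>
    simp only [List.countP_cons, ih]
    have := hd x
    cases hp : p x <;> cases hq : q x <;> simp_all <;> omega

-- Summing per-letter counts over a duplicate-free letter list is countP of membership.
theorem pvSumCounts (vs : List Char) (L : List Char) (hnd : vs.Nodup) :
    (vs.map (fun v => L.count v)).sum = L.countP (fun ch => vs.contains ch) := by
  induction vs with
  | nil => simp
  | cons v vs ih =>
    have hv : v ∉ vs := (List.nodup_cons.mp hnd).1
    have hnd' : vs.Nodup := (List.nodup_cons.mp hnd).2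
    have : L.countP (fun ch => ch == v || vs.contains ch)
        = L.countP (fun ch => ch == v) + L.countP (fun ch => vs.contains ch) := by
      apply pvCountPOr
      intro x ⟨h1, h2⟩
      exact hv (by simpa [beq_iff_eq.mp h1] using h2)
    rw [List.map_cons, List.sum_cons, ih hnd']
    have hc : (fun ch => (v :: vs).contains ch) = (fun ch => ch == v || vs.contains ch) := by
      funext ch; by_cases hcv : ch = v <;> simp [hcv]
    rw [hc, this, List.count_eq_countP]

-- B's per-vowel accumulation as a sum of mapped differences.
theorem pvFoldlDiff (vs : List Char) (f g : Char → Nat) (init : Int) :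
    vs.foldl (fun d v => d + ((f v : Int) - (g v : Int))) init
      = init + ((vs.map f).sum : Int) - ((vs.map g).sum : Int) := by
  induction vs generalizing init with
  | nil => simp
  | cons v vs ih => simp only [List.foldl_cons, List.map_cons, List.sum_cons, ih]; push_cast; omega

-- A's loop body adds the p-indicator and subtracts the q-indicator.
theorem pvFoldlBalance {α : Type} (p q : α → Bool) (L : List α) (init : Int) :
    L.foldl (fun b i =>
      let b := if p i then b + 1 else b
      if q i then b - 1 else b) init = init + L.countP p - L.countP q := by
  induction L generalizing init with
  | nil => simp
  | cons x L ih =>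
    simp only [List.foldl_cons, List.countP_cons, ih]
    split_ifs <;> push_cast <;> omega

-- Counting a predicate of l.getD over range m = counting it over the prefix take m.
theorem pvCountRangeTake (f : Char → Bool) (l : List Char) (m : Nat) (hm : m ≤ l.length) :
    (List.range m).countP (fun k => f (l.getD k ' ')) = (l.take m).countP f := by
  induction m with
  | zero => simp
  | succ m ih =>
    have hm' : m < l.length := hm
    rw [List.range_succ, List.countP_append, List.take_add_one, List.countP_append,
      ih (Nat.le_of_lt hm')]
    simp [List.getD, List.getElem?_eq_getElem hm']

-- Counting a predicate of the mirror index l.getD (len-1-k) over range m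
-- = counting it over the suffix drop (len - m).
theorem pvCountRangeDrop (f : Char → Bool) (l : List Char) (m : Nat) (hm : m ≤ l.length) :
    (List.range m).countP (fun k => f (l.getD (l.length - 1 - k) ' ')) =
      (l.drop (l.length - m)).countP f := by
  induction m with
  | zero => simp
  | succ m ih =>
    have h1 : l.length - (m + 1) < l.length := by omega
    rw [List.range_succ, List.countP_append, ih (by omega),
      List.drop_eq_getElem_cons h1, List.countP_cons]
    have h2 : l.length - 1 - m = l.length - (m + 1) := by omega
    have h3 : l.length - (m + 1) + 1 = l.length - m := by omega
    rw [List.countP_cons]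
    simp [List.getD, h2, h3, List.getElem?_eq_getElem h1]

-- Bridge: A's first-half predicate over range h counts the prefix.
theorem pvCP (f : Char → Bool) (l : List Char) (h : Nat) (hle : h ≤ l.length) :
    (List.range h).countP (fun k : Nat => f (PySem.List.pyGetD l (k : Int) ' ')) =
      (l.take h).countP f := by
  rw [← pvCountRangeTake f l h hle]
  apply List.countP_congr
  intro k hk
  simp

-- Bridge: A's mirror-index predicate over range h counts the suffix.
theorem pvCQ (f : Char → Bool) (l : List Char) (h : Nat) (hle : h ≤ l.length) :
    (List.range h).countP
      (fun k : Nat => f (PySem.List.pyGetD l (PySem.List.len l - 1 - (k : Int)) ' ')) =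
      (l.drop (l.length - h)).countP f := by
  rw [← pvCountRangeDrop f l h hle]
  apply List.countP_congr
  intro k hk
  have hkh : k < h := List.mem_range.mp hk
  have he : PySem.List.len l - 1 - (k : Int) = ((l.length - 1 - k : Nat) : Int) := by
    simp [PySem.List.len]; omega
  rw [he, PySem.List.pyGetD_natCast]

theorem pvMain (s : String) : solution_1_iterative s = solution_1_iterative_alt s := by
  unfold solution_1_iterative solution_1_iterative_alt
  simp only []
  set l := s.toList with hl
  set h : Nat := l.length / 2 with hh
  have hhalf : PySem.Int.floordiv (PySem.List.len l) 2 = (h : Int) := by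
    simp [PySem.Int.floordiv, PySem.List.len, Int.fdiv_eq_ediv, hh]
  have hle : h ≤ l.length := Nat.div_le_self _ _
  have hvnd : ("aeiouAEIOU".toList).Nodup := by decide
  -- A side: the mirror walk as a difference of two countP's over range h
  rw [hhalf, PySem.List.pyRange_zero_natCast, List.foldl_map, pvFoldlBalance]
  -- B side: slices to take/drop, per-vowel counts summed to countP of membership
  have hn : PySem.List.len l - (h : Int) = ((l.length - h : Nat) : Int) := by
    simp [PySem.List.len]; omega
  rw [hn, PySem.List.slice_to_natCast, PySem.List.slice_from_natCast]
  simp only [pvCountSingleton]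
  rw [pvFoldlDiff, pvSumCounts _ _ hvnd, pvSumCounts _ _ hvnd]
  have hset : PySem.Set.ofList "aeiouAEIOU".toList = "aeiouAEIOU".toList :=
    PySem.Set.ofList_eq_self_of_nodup _ hvnd
  rw [hset]
  rw [pvCP (fun ch => PySem.Set.contains "aeiouAEIOU".toList ch) l h hle,
    pvCQ (fun ch => PySem.Set.contains "aeiouAEIOU".toList ch) l h hle]
  simp [PySem.Set.contains_eq_listContains]

-- ===== VERDICT (by name: the statement is the Claim_ definition above) =====
theorem solution_1_iterative_spec : Claim_equal_solution_1_iterative := by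
  intro s _
  show solution_1_iterative s = solution_1_iterative_alt s
  exact pvMain s
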